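-- pv_equiv track=rewrite | github.com/edward-lemonade/phacks | backend/main.py | _validate_counterargument_expand
-- ===== SOURCE A (Python) =====
-- from typing import Optional
--
-- COUNTERARGUMENT_CHILD_TYPES = frozenset({"evidence", "subclaim", "axiom"})
--
-- def _validate_counterargument_expand(data: dict, parent_id: str) -> Optional[str]:
--     """Return an error message if counterargument expansion does not match required topology."""
--     nodes = data.get("nodes")
--     edges = data.get("edges")
--     if not isinstance(nodes, list) or not nodes:
--         return "response must include a non-empty nodes array"
--     if not isinstance(edges, list):
--         return "response must include an edges array"
--
--     cc_ids = [
--         n["id"]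
--         for n in nodes
--         if isinstance(n, dict) and n.get("type") == "counterclaim"
--     ]
--     if len(cc_ids) != 1:
--         return "must include exactly one counterclaim node"
--     cc_id = cc_ids[0]
--
--     cc_to_parent = [
--         e
--         for e in edges
--         if isinstance(e, dict)
--         and e.get("source") == cc_id
--         and e.get("target") == parent_id
--         and e.get("relation") == "contradicts"
--     ]
--     if len(cc_to_parent) != 1:
--         return "counterclaim must have exactly one edge to the parent with relation contradicts"
--
--     for e in edges:
--         if not isinstance(e, dict):
--             continue
--         if e.get("target") == parent_id and e.get("source") != cc_id:
--             return "only the counterclaim may link to the parent node"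
--
--     children = [n for n in nodes if isinstance(n, dict) and n.get("id") != cc_id]
--     if len(children) < 1:
--         return "must include at least one evidence, subclaim, or axiom node linked to the counterclaim"
--
--     for n in children:
--         nid = n.get("id")
--         t = (n.get("type") or "").lower()
--         if t not in COUNTERARGUMENT_CHILD_TYPES:
--             return f"node {nid!r} must be type evidence, subclaim, or axiom (got {t!r})"
--         linked = False
--         for e in edges:
--             if not isinstance(e, dict):
--                 continue
--             if (
--                 e.get("source") == nid
--                 and e.get("target") == cc_id
--                 and e.get("relation") == "supports"
--             ):
--                 linked = True
--                 break
--         if not linked: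
--             return f"node {nid!r} must link to the counterclaim with supports"
--
--     for e in edges:
--         if not isinstance(e, dict):
--             continue
--         if e.get("source") == cc_id and e.get("target") != parent_id:
--             return "counterclaim must only link to the parent in this fragment"
--
--     return None
-- ===== SOURCE B (Python) =====
-- from typing import Optional
--
-- COUNTERARGUMENT_CHILD_TYPES = frozenset({"evidence", "subclaim", "axiom"})
--
-- def _validate_counterargument_expand(data: dict, parent_id: str) -> Optional[str]:
--     """One indexing pass over the edges replaces A's four repeated edge scans."""
--     nodes = data.get("nodes")
--     edges = data.get("edges")
--     if not isinstance(nodes, list) or not nodes: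
--         return "response must include a non-empty nodes array"
--     if not isinstance(edges, list):
--         return "response must include an edges array"
--
--     cc_ids = [
--         n["id"]
--         for n in nodes
--         if isinstance(n, dict) and n.get("type") == "counterclaim"
--     ]
--     if len(cc_ids) != 1:
--         return "must include exactly one counterclaim node"
--     cc_id = cc_ids[0]
--
--     # single pass over edges: build all the facts the guards below need
--     cc_to_parent = 0
--     bad_parent_link = False
--     supporters = set()
--     cc_stray = False
--     for e in edges:
--         if not isinstance(e, dict):
--             continue
--         s = e.get("source")
--         t = e.get("target")
--         r = e.get("relation")
--         if t == parent_id: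
--             if s == cc_id:
--                 if r == "contradicts":
--                     cc_to_parent += 1
--             else:
--                 bad_parent_link = True
--         if t == cc_id and r == "supports":
--             supporters.add(s)
--         if s == cc_id and t != parent_id:
--             cc_stray = True
--
--     if cc_to_parent != 1:
--         return "counterclaim must have exactly one edge to the parent with relation contradicts"
--     if bad_parent_link:
--         return "only the counterclaim may link to the parent node"
--
--     children = [n for n in nodes if isinstance(n, dict) and n.get("id") != cc_id]
--     if len(children) < 1:
--         return "must include at least one evidence, subclaim, or axiom node linked to the counterclaim"
--
--     for n in children:
--         nid = n.get("id")
--         t = (n.get("type") or "").lower()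
--         if t not in COUNTERARGUMENT_CHILD_TYPES:
--             return f"node {nid!r} must be type evidence, subclaim, or axiom (got {t!r})"
--         if nid not in supporters:
--             return f"node {nid!r} must link to the counterclaim with supports"
--
--     if cc_stray:
--         return "counterclaim must only link to the parent in this fragment"
--     return None
-- ===== Notes on version B (the rewrite author's own statement) =====
-- stated objective: alternative
-- what changed: A rescans the edges list four times (a filter, two guard loops, and an inner per-child search); B makes one indexing pass over edges building a count, two flags and a supporters set, and the guards then consult these precomputed values in A's original order.
-- outside the precondition, e.g. on _validate_counterargument_expand({'nodes': [{'type': 'counterclaim'}], 'edges': []}, 'p'): A raises KeyError, B raises KeyError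
import Mathlib
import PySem

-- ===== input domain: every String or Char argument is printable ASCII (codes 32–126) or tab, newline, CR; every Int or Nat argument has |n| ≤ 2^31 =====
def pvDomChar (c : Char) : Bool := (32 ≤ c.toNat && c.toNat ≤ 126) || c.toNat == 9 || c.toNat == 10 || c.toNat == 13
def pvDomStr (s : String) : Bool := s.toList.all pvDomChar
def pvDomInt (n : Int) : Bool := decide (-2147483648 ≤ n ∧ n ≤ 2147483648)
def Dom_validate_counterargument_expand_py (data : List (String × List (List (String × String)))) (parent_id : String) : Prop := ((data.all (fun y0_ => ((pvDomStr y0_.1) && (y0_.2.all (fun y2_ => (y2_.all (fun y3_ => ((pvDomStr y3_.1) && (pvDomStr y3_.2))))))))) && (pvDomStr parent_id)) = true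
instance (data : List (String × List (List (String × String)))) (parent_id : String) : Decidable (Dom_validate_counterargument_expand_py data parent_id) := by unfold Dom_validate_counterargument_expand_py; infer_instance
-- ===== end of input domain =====

-- B replaces A's four separate scans over the edges list by ONE indexing pass
-- (count, two flags, a supporters set) consulted by the guards (objective: alternative).

-- ===== PORT A =====
-- shared helpers: first-match association-list lookup (= python dict.get) and python repr of a str / Optional[str]
def pvDget {ν : Type} (d : List (String × ν)) (k : String) : Option ν :=
  (PySem.Dict.mk d).get? k

def pvReprStr (s : String) : String :=
  let cs := s.toList
  let q : Char := if cs.contains '\'' && !cs.contains '"' then '"' else '\''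
  let body := cs.foldl (fun acc c =>
    acc ++ (if c = '\\' then "\\\\"
      else if c = q then String.mk ['\\', q]
      else if c = '\n' then "\\n"
      else if c = '\r' then "\\r"
      else if c = '\t' then "\\t"
      else String.mk [c])) ""
  String.mk [q] ++ body ++ String.mk [q]

def pvReprOpt : Option String → String
  | none => "None"
  | some s => pvReprStr s

-- t in COUNTERARGUMENT_CHILD_TYPES
def pvIsChildType (t : String) : Bool :=
  t == "evidence" || t == "subclaim" || t == "axiom"

-- A's inner 'for e in edges: … linked = True; break' search
def pvALinked (edges : List (List (String × String))) (nid cc : Option String) : Bool :=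
  edges.any (fun e =>
    pvDget e "source" == nid && pvDget e "target" == cc && pvDget e "relation" == some "supports")

-- A's 'for n in children' loop
def pvAChildren (edges : List (List (String × String))) (cc : Option String) :
    List (List (String × String)) → Option String
  | [] => none
  | n :: rest =>
    let nid := pvDget n "id"
    let t := PySem.Str.lower ((pvDget n "type").getD "")
    if !pvIsChildType t then
      some ("node " ++ pvReprOpt nid ++ " must be type evidence, subclaim, or axiom (got " ++ pvReprStr t ++ ")")
    else if !pvALinked edges nid cc then
      some ("node " ++ pvReprOpt nid ++ " must link to the counterclaim with supports")
    else pvAChildren edges cc rest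

def validate_counterargument_expand_py (data : List (String × List (List (String × String)))) (parent_id : String) : Option String :=
  match pvDget data "nodes" with
  | none => some "response must include a non-empty nodes array"
  | some nodes =>
    if nodes = [] then some "response must include a non-empty nodes array" else
    match pvDget data "edges" with
    | none => some "response must include an edges array"
    | some edges =>
      let cc_ids := (nodes.filter (fun n => pvDget n "type" == some "counterclaim")).map
        (fun n => pvDget n "id")
      match cc_ids with
      | [cc] =>
        let cc_to_parent := edges.filter (fun e =>
          pvDget e "source" == cc && pvDget e "target" == some parent_id &&
            pvDget e "relation" == some "contradicts")
        if cc_to_parent.length ≠ 1 then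
          some "counterclaim must have exactly one edge to the parent with relation contradicts"
        else if edges.any (fun e =>
            pvDget e "target" == some parent_id && pvDget e "source" != cc) then
          some "only the counterclaim may link to the parent node"
        else
          let children := nodes.filter (fun n => pvDget n "id" != cc)
          if children.length < 1 then
            some "must include at least one evidence, subclaim, or axiom node linked to the counterclaim"
          else
            match pvAChildren edges cc children with
            | some msg => some msg
            | none =>
              if edges.any (fun e =>
                  pvDget e "source" == cc && pvDget e "target" != some parent_id) then
                some "counterclaim must only link to the parent in this fragment"
              else none
      | _ => some "must include exactly one counterclaim node"

-- ===== PORT B =====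
-- B's single indexing pass: state = (cc_to_parent count, bad_parent_link, supporters, cc_stray)
def pvBStep (parent_id : String) (cc : Option String)
    (st : Int × Bool × PySem.Set (Option String) × Bool) (e : List (String × String)) :
    Int × Bool × PySem.Set (Option String) × Bool :=
  let s := pvDget e "source"
  let t := pvDget e "target"
  let r := pvDget e "relation"
  let cnt := if t == some parent_id then
      (if s == cc then (if r == some "contradicts" then st.1 + 1 else st.1) else st.1)
    else st.1
  let bad := if t == some parent_id && !(s == cc) then true else st.2.1
  let sup := if t == cc && r == some "supports" then PySem.Set.add st.2.2.1 s else st.2.2.1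
  let stray := if s == cc && !(t == some parent_id) then true else st.2.2.2
  (cnt, bad, sup, stray)

-- B's 'for n in children' loop, testing the supporters set instead of scanning edges
def pvBChildren (sup : PySem.Set (Option String)) :
    List (List (String × String)) → Option String
  | [] => none
  | n :: rest =>
    let nid := pvDget n "id"
    let t := PySem.Str.lower ((pvDget n "type").getD "")
    if !pvIsChildType t then
      some ("node " ++ pvReprOpt nid ++ " must be type evidence, subclaim, or axiom (got " ++ pvReprStr t ++ ")")
    else if !(PySem.Set.contains sup nid) then
      some ("node " ++ pvReprOpt nid ++ " must link to the counterclaim with supports")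
    else pvBChildren sup rest

def validate_counterargument_expand_py_alt (data : List (String × List (List (String × String)))) (parent_id : String) : Option String :=
  (pvDget data "nodes").elim (some "response must include a non-empty nodes array") (fun nodes =>
    if nodes = [] then some "response must include a non-empty nodes array" else
    (pvDget data "edges").elim (some "response must include an edges array") (fun edges =>
      let cc_ids := (nodes.filter (fun n => pvDget n "type" == some "counterclaim")).map
        (fun n => pvDget n "id")
      if cc_ids.length ≠ 1 then some "must include exactly one counterclaim node" else
      let cc := cc_ids.headI
      let st := edges.foldl (pvBStep parent_id cc) (0, false, PySem.Set.empty, false)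
      if st.1 ≠ 1 then
        some "counterclaim must have exactly one edge to the parent with relation contradicts"
      else if st.2.1 then
        some "only the counterclaim may link to the parent node"
      else
        let children := nodes.filter (fun n => pvDget n "id" != cc)
        if children.length < 1 then
          some "must include at least one evidence, subclaim, or axiom node linked to the counterclaim"
        else
          (pvBChildren st.2.2.1 children).elim
            (if st.2.2.2 then
              some "counterclaim must only link to the parent in this fragment"
            else none)
            (fun msg => some msg)))

-- ===== PRECONDITION & SPEC =====
-- Pre_ excludes exactly the inputs where Python A raises KeyError: a counterclaim node
-- without an "id" key (reached only when nodes is present non-empty and edges is present).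
def Pre_validate_counterargument_expand_py (data : List (String × List (List (String × String)))) (parent_id : String) : Prop :=
  (pvDget data "edges").isSome →
    ∀ ns ∈ (pvDget data "nodes").toList, ∀ n ∈ ns,
      pvDget n "type" = some "counterclaim" → (pvDget n "id").isSome
instance (data : List (String × List (List (String × String)))) (parent_id : String) : Decidable (Pre_validate_counterargument_expand_py data parent_id) := by unfold Pre_validate_counterargument_expand_py; infer_instance

def pvWitness_validate_counterargument_expand_py : (List (String × List (List (String × String)))) × String :=
  ([("nodes", [[("id", "c"), ("type", "counterclaim")], [("id", "a"), ("type", "evidence")]]),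
    ("edges", [[("source", "c"), ("target", "p"), ("relation", "contradicts")],
               [("source", "a"), ("target", "c"), ("relation", "supports")]])], "p")

def Spec_validate_counterargument_expand_py (data : List (String × List (List (String × String)))) (parent_id : String) (out : Option String) : Prop := out = validate_counterargument_expand_py_alt data parent_id
instance (data : List (String × List (List (String × String)))) (parent_id : String) (out : Option String) : Decidable (Spec_validate_counterargument_expand_py data parent_id out) := by unfold Spec_validate_counterargument_expand_py; infer_instance

-- ===== CLAIM (what is proved, stated in full; the proofs are below) =====
def Claim_equal_validate_counterargument_expand_py : Prop := ∀ (data : List (String × List (List (String × String)))) (parent_id : String), Dom_validate_counterargument_expand_py data parent_id → Pre_validate_counterargument_expand_py data parent_id → Spec_validate_counterargument_expand_py data parent_id (validate_counterargument_expand_py data parent_id)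

-- ===== LEMMAS AND PROOFS =====

theorem pvFold_count (parent_id : String) (cc : Option String)
    (edges : List (List (String × String))) (st : Int × Bool × PySem.Set (Option String) × Bool) :
    (edges.foldl (pvBStep parent_id cc) st).1 =
      st.1 + ((edges.filter (fun e =>
        pvDget e "source" == cc && pvDget e "target" == some parent_id &&
          pvDget e "relation" == some "contradicts")).length : Int) := by
  induction edges generalizing st with
  | nil => simp
  | cons e es ih =>
    simp only [List.foldl_cons, ih, List.filter_cons]
    by_cases h1 : pvDget e "source" == cc <;>
      by_cases h2 : pvDget e "target" == some parent_id <;>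
        by_cases h3 : pvDget e "relation" == some "contradicts" <;>
          simp [pvBStep, h1, h2, h3] <;> omega

theorem pvFold_bad (parent_id : String) (cc : Option String)
    (edges : List (List (String × String))) (st : Int × Bool × PySem.Set (Option String) × Bool) :
    (edges.foldl (pvBStep parent_id cc) st).2.1 =
      (st.2.1 || edges.any (fun e =>
        pvDget e "target" == some parent_id && pvDget e "source" != cc)) := by
  induction edges generalizing st with
  | nil => simp
  | cons e es ih =>
    have hstep : (pvBStep parent_id cc st e).2.1 =
        (st.2.1 || (pvDget e "target" == some parent_id && pvDget e "source" != cc)) := by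
      simp only [pvBStep, bne]
      by_cases h1 : pvDget e "target" == some parent_id <;>
        by_cases h2 : pvDget e "source" == cc <;> simp [h1, h2]
    simp only [List.foldl_cons, ih, hstep, List.any_cons, Bool.or_assoc]

theorem pvFold_stray (parent_id : String) (cc : Option String)
    (edges : List (List (String × String))) (st : Int × Bool × PySem.Set (Option String) × Bool) :
    (edges.foldl (pvBStep parent_id cc) st).2.2.2 =
      (st.2.2.2 || edges.any (fun e =>
        pvDget e "source" == cc && pvDget e "target" != some parent_id)) := by
  induction edges generalizing st with
  | nil => simp
  | cons e es ih =>
    have hstep : (pvBStep parent_id cc st e).2.2.2 =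
        (st.2.2.2 || (pvDget e "source" == cc && pvDget e "target" != some parent_id)) := by
      simp only [pvBStep, bne]
      by_cases h1 : pvDget e "source" == cc <;>
        by_cases h2 : pvDget e "target" == some parent_id <;> simp [h1, h2]
    simp only [List.foldl_cons, ih, hstep, List.any_cons, Bool.or_assoc]

theorem pvSet_contains_add (s : PySem.Set (Option String)) (a x : Option String) :
    PySem.Set.contains (PySem.Set.add s a) x =
      (PySem.Set.contains s x || a == x) := by
  by_cases h : a = x
  · subst h
    by_cases hc : PySem.Set.contains s a <;>
      simp_all [PySem.Set.add, PySem.Set.contains]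
  · have h' : ¬ x = a := fun hx => h hx.symm
    by_cases hc : PySem.Set.contains s a <;>
      simp_all [PySem.Set.add, PySem.Set.contains]

theorem pvFold_sup (parent_id : String) (cc : Option String)
    (edges : List (List (String × String))) (st : Int × Bool × PySem.Set (Option String) × Bool)
    (x : Option String) :
    PySem.Set.contains (edges.foldl (pvBStep parent_id cc) st).2.2.1 x =
      (PySem.Set.contains st.2.2.1 x || pvALinked edges x cc) := by
  induction edges generalizing st with
  | nil => simp [pvALinked]
  | cons e es ih =>
    have hstep : PySem.Set.contains (pvBStep parent_id cc st e).2.2.1 x =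
        (PySem.Set.contains st.2.2.1 x ||
          (pvDget e "source" == x && pvDget e "target" == cc &&
            pvDget e "relation" == some "supports")) := by
      simp only [pvBStep]
      by_cases h1 : pvDget e "target" == cc <;>
        by_cases h2 : pvDget e "relation" == some "supports" <;>
          · by_cases hx : x = pvDget e "source"
            · simp [h1, h2, pvSet_contains_add, hx]
            · have hx' : ¬ pvDget e "source" = x := fun hh => hx hh.symm
              simp [h1, h2, pvSet_contains_add, hx, hx']
    simp only [List.foldl_cons, ih, hstep, pvALinked, List.any_cons, Bool.or_assoc]

theorem pvChildren_eq (edges : List (List (String × String))) (cc : Option String)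
    (sup : PySem.Set (Option String))
    (h : ∀ x, PySem.Set.contains sup x = pvALinked edges x cc) :
    ∀ children, pvAChildren edges cc children = pvBChildren sup children := by
  intro children
  induction children with
  | nil => rfl
  | cons n rest ih =>
    simp only [pvAChildren, pvBChildren, h, ih]

theorem validate_counterargument_expand_py_eq (data : List (String × List (List (String × String)))) (parent_id : String) :
    validate_counterargument_expand_py data parent_id =
      validate_counterargument_expand_py_alt data parent_id := by
  unfold validate_counterargument_expand_py validate_counterargument_expand_py_alt
  cases pvDget data "nodes" with
  | none => rfl
  | some nodes =>
    by_cases hne : nodes = []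
    · simp [hne]
    · simp only [hne, if_false, Option.elim_some]
      cases pvDget data "edges" with
      | none => rfl
      | some edges =>
        simp only [Option.elim_some]
        cases hcc : (nodes.filter (fun n => pvDget n "type" == some "counterclaim")).map
            (fun n => pvDget n "id") with
        | nil => simp [hcc]
        | cons cc tail =>
          cases tail with
          | cons _ _ => simp [hcc]
          | nil =>
            simp only [hcc, List.length_cons, List.length_nil, List.headI]
            have hsup : ∀ x, PySem.Set.contains
                ((edges.foldl (pvBStep parent_id cc) (0, false, PySem.Set.empty, false)).2.2.1) x =
                pvALinked edges x cc := by
              intro x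
              rw [pvFold_sup]
              simp [PySem.Set.contains, PySem.Set.empty]
            simp only [pvFold_count, pvFold_bad, pvFold_stray,
              pvChildren_eq edges cc _ hsup]
            cases hbc : pvBChildren ((edges.foldl (pvBStep parent_id cc)
                (0, false, PySem.Set.empty, false)).2.2.1)
                (nodes.filter (fun n => pvDget n "id" != cc)) <;>
              simp [hbc]

-- ===== VERDICT (by name: the statement is the Claim_ definition above) =====
theorem validate_counterargument_expand_py_spec : Claim_equal_validate_counterargument_expand_py := by
  intro data parent_id _ _
  unfold Spec_validate_counterargument_expand_py
  exact validate_counterargument_expand_py_eq data parent_id
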